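-- pv_equiv track=rewrite | github.com/syaofox/VidZap | src/core/cookie_manager.py | is_valid_domain
-- ===== SOURCE A (Python) =====
-- def is_valid_domain(domain: str) -> bool:
--     """校验域名格式是否合法。"""
--     if not domain or len(domain) > 253:
--         return False
--     parts = domain.split(".")
--     # 至少两段（如 youtube.com）
--     if len(parts) < 2:
--         return False
--     for part in parts:
--         if not part or len(part) > 63:
--             return False
--         if not all(c.isalnum() or c == "-" for c in part):
--             return False
--         if part.startswith("-") or part.endswith("-"):
--             return False
--     return True
-- ===== SOURCE B (Python) =====
-- def is_valid_domain(domain: str) -> bool: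
--     """Single left-to-right pass: validate each dot-separated label in place,
--     tracking segment length, first/last char and a dot counter (no split)."""
--     if not domain or len(domain) > 253:
--         return False
--     seg_len = 0
--     first = None
--     last = None
--     dots = 0
--
--     def seg_ok():
--         return 1 <= seg_len <= 63 and first != "-" and last != "-"
--
--     for c in domain:
--         if c == ".":
--             if not seg_ok():
--                 return False
--             dots += 1
--             seg_len = 0
--             first = None
--             last = None
--         else:
--             if not (c.isalnum() or c == "-"):
--                 return False
--             if seg_len == 0:
--                 first = c
--             last = c
--             seg_len += 1
--     return dots >= 1 and seg_ok()
-- ===== Notes on version B (the rewrite author's own statement) =====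
-- stated objective: alternative
-- what changed: Replaces the split-into-labels-then-loop-over-labels structure with a single left-to-right character pass that validates each dot-separated label in place via segment length, first/last character and a dot counter.
import Mathlib
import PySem

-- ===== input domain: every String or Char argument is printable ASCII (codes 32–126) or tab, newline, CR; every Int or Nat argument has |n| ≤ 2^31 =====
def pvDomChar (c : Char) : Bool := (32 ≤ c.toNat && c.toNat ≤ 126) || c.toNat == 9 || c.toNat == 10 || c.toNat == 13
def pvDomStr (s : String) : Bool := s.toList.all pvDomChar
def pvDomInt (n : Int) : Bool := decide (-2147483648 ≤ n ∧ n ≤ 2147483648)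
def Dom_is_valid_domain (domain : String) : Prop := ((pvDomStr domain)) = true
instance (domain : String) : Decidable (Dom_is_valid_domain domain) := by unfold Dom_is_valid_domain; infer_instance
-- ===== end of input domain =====

-- B replaces split('.')-then-loop-over-labels by a single left-to-right character
-- pass validating each label in place (objective: alternative decomposition, same cost).

-- ===== PORT A =====
-- `c.isalnum() or c == "-"` (shared subexpression of both Pythons)
def pvGood (c : Char) : Bool := PySem.Chars.isalnum c || c == '-'

-- A's `for part in parts` loop with its early returns, branches in A's order
def pvALoop : List (List Char) → Bool
  | [] => true
  | p :: ps =>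
    if p = [] || decide (p.length > 63) then false
    else if !(p.all pvGood) then false
    else if PySem.Chars.startswith p ['-'] || PySem.Chars.endswith p ['-'] then false
    else pvALoop ps

def is_valid_domain (domain : String) : Bool :=
  let cs := domain.toList
  if cs = [] || decide (cs.length > 253) then false
  else
    let parts := PySem.Chars.splitOn cs ['.']
    if parts.length < 2 then false
    else pvALoop parts

-- ===== PORT B =====
-- Source B's seg_ok(): 1 <= seg_len <= 63 and first != "-" and last != "-"
def pvSegOk (segLen : Nat) (first last : Option Char) : Bool :=
  decide (1 ≤ segLen) && decide (segLen ≤ 63) && first != some '-' && last != some '-'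

-- Source B's for-loop: state (seg_len, first, last, dots), early returns as `false`
def pvBLoop : List Char → Nat → Option Char → Option Char → Nat → Bool
  | [], segLen, first, last, dots => decide (1 ≤ dots) && pvSegOk segLen first last
  | c :: rest, segLen, first, last, dots =>
    if c = '.' then
      if !pvSegOk segLen first last then false
      else pvBLoop rest 0 none none (dots + 1)
    else
      if !pvGood c then false
      else pvBLoop rest (segLen + 1) (if segLen = 0 then some c else first) (some c) dots

def is_valid_domain_alt (domain : String) : Bool :=
  let cs := domain.toList
  if cs = [] || decide (cs.length > 253) then false
  else pvBLoop cs 0 none none 0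

-- ===== PRECONDITION & SPEC =====
def Spec_is_valid_domain (domain : String) (out : Bool) : Prop := out = is_valid_domain_alt domain
instance (domain : String) (out : Bool) : Decidable (Spec_is_valid_domain domain out) := by unfold Spec_is_valid_domain; infer_instance

-- ===== CLAIM (what is proved, stated in full; the proofs are below) =====
def Claim_equal_is_valid_domain : Prop := ∀ (domain : String), Dom_is_valid_domain domain → Spec_is_valid_domain domain (is_valid_domain domain)

-- ===== LEMMAS AND PROOFS =====

-- a label is valid iff B's per-segment data would accept it and all its chars are good
def pvValid (p : List Char) : Bool := pvSegOk p.length p.head? p.getLast? && p.all pvGood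

theorem pvStartswith_head (p : List Char) :
    PySem.Chars.startswith p ['-'] = (p.head? == some '-') := by
  cases p with
  | nil => rfl
  | cons a l => simp [PySem.Chars.startswith, List.isPrefixOf, eq_comm]

theorem pvEndswith_getLast (p : List Char) :
    PySem.Chars.endswith p ['-'] = (p.getLast? == some '-') := by
  have : PySem.Chars.endswith p ['-'] = PySem.Chars.startswith p.reverse ['-'] := by
    simp [PySem.Chars.endswith, PySem.Chars.startswith, List.isSuffixOf]
  rw [this, pvStartswith_head, List.head?_reverse]

theorem pvALoop_eq_all (ps : List (List Char)) : pvALoop ps = ps.all pvValid := by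
  induction ps with
  | nil => rfl
  | cons p ps ih =>
    simp only [pvALoop, List.all_cons, ih, pvValid, pvSegOk,
      pvStartswith_head, pvEndswith_getLast]
    by_cases h0 : p = []
    · subst h0; simp
    · have h1 : 1 ≤ p.length := List.length_pos_of_ne_nil h0
      by_cases h2 : p.length > 63
      · simp [h0, h2, Nat.not_le.mpr h2]
      · simp only [h0, h2]
        by_cases h3 : p.all pvGood
        · by_cases h4 : p.head? == some '-' <;> by_cases h5 : p.getLast? == some '-' <;>
            simp [h1, Nat.le_of_not_lt h2, h3, h4, h5, bne]
        · simp [h3]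

theorem pvModifyHead_nil (l : List (List Char)) :
    List.modifyHead (fun x => ([] : List Char) ++ x) l = l := by
  cases l <;> rfl

theorem pvModifyHead_id' (l : List (List Char)) :
    List.modifyHead (fun x => x) l = l := by
  cases l <;> rfl

theorem pvGo_eq (d : Char) (l : List Char) : ∀ (fuel : Nat) (cur : List Char)
    (acc : List (List Char)), l.length ≤ fuel →
    PySem.Chars.splitOn.go [d] fuel l cur acc
      = acc.reverse ++ (List.splitOnP (· == d) l).modifyHead (cur.reverse ++ ·) := by
  induction l with
  | nil =>
    intro fuel cur acc _
    cases fuel <;> simp [PySem.Chars.splitOn.go, List.splitOnP_nil]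
  | cons c rest ih =>
    intro fuel cur acc hf
    cases fuel with
    | zero => simp at hf
    | succ f =>
      have hf' : rest.length ≤ f := by simpa using hf
      simp only [PySem.Chars.splitOn.go, List.isPrefixOf, Bool.and_true,
        List.splitOnP_cons]
      by_cases hc : (d == c) = true
      · have hc' : (c == d) = true := by
          have := eq_of_beq hc; simp [this]
        rw [if_pos hc, hc', if_pos rfl]
        rw [show List.drop [d].length (c :: rest) = rest from rfl]
        rw [ih f [] (cur.reverse :: acc) hf']
        simp [pvModifyHead_id']
      · have hc' : (c == d) = false := by
          cases h : c == d
          · rfl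
          · exfalso; apply hc; have := eq_of_beq h; simp [this]
        rw [if_neg hc, hc']
        rw [ih f (c :: cur) acc hf']
        simp only [Bool.false_eq_true, if_false, List.modifyHead_modifyHead]
        congr 1
        congr 1
        funext x
        simp

theorem pvSplitOn_eq (cs : List Char) (d : Char) :
    PySem.Chars.splitOn cs [d] = List.splitOnP (· == d) cs := by
  rw [PySem.Chars.splitOn, pvGo_eq d cs (cs.length + 1) [] [] (by omega)]
  simp only [List.reverse_nil, List.nil_append, pvModifyHead_id']

theorem pvLen_splitOnP (cs : List Char) :
    (List.splitOnP (· == '.') cs).length = cs.countP (· == '.') + 1 := by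
  induction cs with
  | nil => simp [List.splitOnP_nil]
  | cons c rest ih =>
    rw [List.splitOnP_cons, List.countP_cons]
    by_cases h : (c == '.') = true <;> simp [h, ih, List.length_modifyHead]

theorem pvBLoop_eq (cs : List Char) : ∀ (cur : List Char) (dots : Nat),
    cur.all pvGood = true →
    pvBLoop cs cur.length cur.head? cur.getLast? dots
      = (decide (1 ≤ dots + cs.countP (· == '.'))
          && ((List.splitOnP (· == '.') cs).modifyHead (cur ++ ·)).all pvValid) := by
  induction cs with
  | nil =>
    intro cur dots hcur
    simp [pvBLoop, List.splitOnP_nil, pvValid, hcur, Bool.and_comm]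
  | cons c rest ih =>
    intro cur dots hcur
    by_cases hc : c = '.'
    · subst hc
      simp only [pvBLoop, List.splitOnP_cons, List.countP_cons, beq_self_eq_true, if_true]
      have := ih [] (dots + 1) (by simp)
      simp only [List.length_nil, List.head?_nil, List.getLast?_nil] at this
      rw [this]
      rw [pvModifyHead_nil]
      have h1 : decide (1 ≤ dots + 1 + rest.countP (· == '.')) = true := by
        simp; omega
      have h2 : decide (1 ≤ dots + (rest.countP (· == '.') + 1)) = true := by
        simp; omega
      rw [h1, h2, Bool.true_and, Bool.true_and]
      have hmh : List.modifyHead (fun x => cur ++ x) ([] :: List.splitOnP (· == '.') rest)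
          = cur :: List.splitOnP (· == '.') rest := by
        simp [List.modifyHead]
      rw [hmh, List.all_cons]
      have hv : pvValid cur = pvSegOk cur.length cur.head? cur.getLast? := by
        simp [pvValid, hcur]
      rw [hv]
      by_cases hs : pvSegOk cur.length cur.head? cur.getLast? = true
      · simp [hs]
      · simp [Bool.eq_false_iff.mpr hs]
    · have hc' : (c == '.') = false := by simpa using hc
      simp only [pvBLoop, if_neg hc, List.splitOnP_cons, hc', Bool.false_eq_true, if_false,
        List.countP_cons, List.modifyHead_modifyHead]
      obtain ⟨h, t, hrest⟩ := List.exists_cons_of_ne_nil (List.splitOnP_ne_nil (· == '.') rest)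
      by_cases hg : pvGood c = true
      · have hcur' : (cur ++ [c]).all pvGood = true := by simp [hcur, hg]
        have := ih (cur ++ [c]) dots hcur'
        have hlen : (cur ++ [c]).length = cur.length + 1 := by simp
        have hhead : (cur ++ [c]).head? = (if cur.length = 0 then some c else cur.head?) := by
          cases cur <;> simp
        have hlast : (cur ++ [c]).getLast? = some c := by simp
        rw [hlen, hhead, hlast] at this
        simp only [hg, Bool.not_true, Bool.false_eq_true, if_false, this]
        have hfe : ((fun x => cur ++ x) ∘ List.cons c) = (fun x => cur ++ [c] ++ x) := by
          funext x; simp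
        rw [hfe]
        simp
      · have hg' : pvGood c = false := Bool.eq_false_iff.mpr hg
        simp only [hg', Bool.not_false, hrest]
        simp [pvValid, hg']

theorem is_valid_domain_spec : Claim_equal_is_valid_domain := by
  intro domain _
  unfold Spec_is_valid_domain is_valid_domain is_valid_domain_alt
  set cs := domain.toList with hcs
  by_cases hg : (cs = [] || decide (cs.length > 253)) = true
  · simp [hg]
  · simp only [Bool.eq_false_iff.mpr hg, Bool.false_eq_true, if_false]
    have hB := pvBLoop_eq cs [] 0 (by simp)
    simp only [List.length_nil, List.head?_nil, List.getLast?_nil, Nat.zero_add] at hB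
    rw [hB, pvSplitOn_eq, pvALoop_eq_all]
    have hid : (fun x => ([] : List Char) ++ x) = id := by funext x; simp
    rw [hid, List.modifyHead_id]
    simp only [id]
    rw [pvLen_splitOnP]
    by_cases h1 : 1 ≤ cs.countP (· == '.')
    · have : ¬ (cs.countP (· == '.') + 1 < 2) := by omega
      simp [this, h1]
    · have : cs.countP (· == '.') + 1 < 2 := by omega
      simp [this, h1]
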